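-- pv_equiv track=rewrite | github.com/LSSTDESC/rail_base | src/rail/utils/interactive/docstring_utils.py | _map_ceci_to_param
-- ===== SOURCE A (Python) =====
-- def _map_ceci_to_param(input_name: str, parameter_names: list[str]) -> str:
--     """Check a ceci input tag against a set of parameter names for the entrypoint
--     function, and determine if the tag matches up to any of them, and if so, which.
--
--     The idea here is that a stage may have inputs `data` and `model`, and expect that
--     `model` is passed to `make_stage`, and `data` is passed to the entrypoints function.
--     This has the side effect that while `data` appears in the entrypoint function that
--     we analyze, `model` does not.
--     Since `model` is still a required element to run the stage, we need to make sure it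
--     is added to the docstring of the interactive version. However, we don't want to
--     duplicate `data` in that docstring.
--     Finally, we have the added complication that often tag names don't line up with the
--     parameter names used for the same piece of information. So the stage may have the
--     ceci input `data`, which corresponds to the parameter `input_data`.
--
--     Parameters
--     ----------
--     input_name : str
--         The tag name for the ceci input to a RailStage
--     parameter_names : list[str]
--         A list of names to check against, that would disqualify the ceci tag from being
--         added to the docstring as an independent item
--
--     Returns
--     -------
--     str
--         The name of the parameter corresponding to this tag, or the original tag name if
--         none were found
--     """
--     if input_name in parameter_names:
--         return input_name
--
--     if f"{input_name}_data" in parameter_names: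
--         # `input` and `input_data`, sometimes `truth` and `truth_data`
--         return f"{input_name}_data"
--
--     if input_name == "input":
--         for name in ["data", "training_data", "catalog", "sample"]:
--             # `input` often corresponds to one of these
--             if name in parameter_names:
--                 return name
--
--     if input_name.endswith("_input") and (
--         input_name.replace("_input", "_data") in parameter_names
--     ):
--         # `spec_input` and `spec_data`
--         return input_name.replace("_input", "_data")
--
--     return input_name
-- ===== SOURCE B (Python) =====
-- def _map_ceci_to_param(input_name: str, parameter_names: list[str]) -> str:
--     """Single pass over parameter_names: rank each parameter by how preferred a
--     match it is for the tag, and return the best-ranked parameter, else the tag."""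
--     data_name = input_name + "_data"
--     repl_name = (
--         input_name.replace("_input", "_data")
--         if input_name.endswith("_input")
--         else None
--     )
--
--     def rank(name: str):
--         if name == input_name:
--             return 0
--         if name == data_name:
--             return 1
--         if input_name == "input":
--             if name == "data":
--                 return 2
--             if name == "training_data":
--                 return 3
--             if name == "catalog":
--                 return 4
--             if name == "sample":
--                 return 5
--         if repl_name is not None and name == repl_name:
--             return 6
--         return None
--
--     best = None
--     for name in parameter_names:
--         r = rank(name)
--         if r is not None and (best is None or r < best[0]):
--             best = (r, name)
--     return best[1] if best is not None else input_name
-- ===== Notes on version B (the rewrite author's own statement) =====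
-- stated objective: alternative
-- what changed: Inverts the traversal: instead of testing a cascade of candidate strings for membership in parameter_names, B scans parameter_names once, assigns each parameter a priority rank (0=tag itself, 1=tag_data, 2-5=input specials, 6=_input->_data form), and returns the lowest-ranked parameter found.
import Mathlib
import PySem

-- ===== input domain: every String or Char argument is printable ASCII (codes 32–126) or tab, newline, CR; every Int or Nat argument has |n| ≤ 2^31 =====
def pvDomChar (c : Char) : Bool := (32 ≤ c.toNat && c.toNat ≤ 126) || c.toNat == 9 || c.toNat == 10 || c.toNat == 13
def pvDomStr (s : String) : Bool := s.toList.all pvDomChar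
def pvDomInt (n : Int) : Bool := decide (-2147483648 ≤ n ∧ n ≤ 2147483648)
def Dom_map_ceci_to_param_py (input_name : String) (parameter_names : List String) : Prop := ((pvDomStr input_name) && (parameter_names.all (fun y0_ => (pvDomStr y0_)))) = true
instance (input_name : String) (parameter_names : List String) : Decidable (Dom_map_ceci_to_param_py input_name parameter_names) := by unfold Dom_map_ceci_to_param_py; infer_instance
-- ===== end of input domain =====

-- B inverts the traversal: one pass over parameter_names assigning each a priority rank and keeping the best, instead of A's candidate cascade (objective: alternative).


-- ===== PORT A =====
def pyFirstIn (names : List String) (parameter_names : List String) : Option String :=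
  match names with
  | [] => none
  | n :: rest => if parameter_names.contains n then some n else pyFirstIn rest parameter_names

def map_ceci_to_param_py (input_name : String) (parameter_names : List String) : String :=
  if parameter_names.contains input_name then input_name
  else if parameter_names.contains (input_name ++ "_data") then input_name ++ "_data"
  else
    match (if input_name = "input" then
             pyFirstIn ["data", "training_data", "catalog", "sample"] parameter_names
           else none) with
    | some n => n
    | none =>
      if PySem.Str.endswith input_name "_input"
          && parameter_names.contains (PySem.Str.replace input_name "_input" "_data") then
        PySem.Str.replace input_name "_input" "_data"
      else input_name

-- ===== PORT B =====
-- B's rank(name): priority of a parameter name as a match for the tag (none = no match);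
-- data_name and repl_name are hoisted out of the loop in Source B, so they are parameters here
def rankB (input_name data_name : String) (repl_name : Option String) (name : String) : Option Nat :=
  if name = input_name then some 0
  else if name = data_name then some 1
  else
    let special : Option Nat :=
      if input_name = "input" then
        if name = "data" then some 2
        else if name = "training_data" then some 3
        else if name = "catalog" then some 4
        else if name = "sample" then some 5
        else none
      else none
    match special with
    | some r => some r
    | none =>
      match repl_name with
      | some rp => if name = rp then some 6 else none
      | none => none

-- B's loop body: keep the best-ranked (rank, name) pair seen so far
def stepB (rk : String → Option Nat) (best : Option (Nat × String)) (name : String) : Option (Nat × String) :=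
  match rk name with
  | none => best
  | some r =>
    match best with
    | none => some (r, name)
    | some (br, bn) => if r < br then some (r, name) else some (br, bn)

def map_ceci_to_param_py_alt (input_name : String) (parameter_names : List String) : String :=
  let data_name := input_name ++ "_data"
  let repl_name : Option String :=
    if PySem.Str.endswith input_name "_input" = true then
      some (PySem.Str.replace input_name "_input" "_data")
    else none
  match parameter_names.foldl (stepB (rankB input_name data_name repl_name)) none with
  | some (_, n) => n
  | none => input_name

-- ===== PRECONDITION & SPEC =====
def Spec_map_ceci_to_param_py (input_name : String) (parameter_names : List String) (out : String) : Prop := out = map_ceci_to_param_py_alt input_name parameter_names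
instance (input_name : String) (parameter_names : List String) (out : String) : Decidable (Spec_map_ceci_to_param_py input_name parameter_names out) := by unfold Spec_map_ceci_to_param_py; infer_instance

-- ===== CLAIM (what is proved, stated in full; the proofs are below) =====
def Claim_equal_map_ceci_to_param_py : Prop := ∀ (input_name : String) (parameter_names : List String), Dom_map_ceci_to_param_py input_name parameter_names → Spec_map_ceci_to_param_py input_name parameter_names (map_ceci_to_param_py input_name parameter_names)

-- ===== LEMMAS AND PROOFS =====

-- inversion: a ranked parameter is exactly one of the candidate strings
lemma rankB_inv (inp dn : String) (rn : Option String) (p : String) (r : Nat)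
    (h : rankB inp dn rn p = some r) :
    (r = 0 ∧ p = inp) ∨ (r = 1 ∧ p = dn) ∨
    (r = 2 ∧ inp = "input" ∧ p = "data") ∨ (r = 3 ∧ inp = "input" ∧ p = "training_data") ∨
    (r = 4 ∧ inp = "input" ∧ p = "catalog") ∨ (r = 5 ∧ inp = "input" ∧ p = "sample") ∨
    (r = 6 ∧ rn = some p) := by
  unfold rankB at h
  rcases rn with _ | rp <;> split_ifs at h <;> simp_all

-- if no element of ps is ranked, the fold is the identity on the accumulator
lemma foldB_none (rk : String → Option Nat) (ps : List String) :
    ∀ acc, (∀ p ∈ ps, rk p = none) → ps.foldl (stepB rk) acc = acc := by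
  induction ps with
  | nil => intro acc _; rfl
  | cons p ps ih =>
    intro acc h
    have hp : rk p = none := h p (by simp)
    simp only [List.foldl_cons, stepB, hp]
    exact ih acc (fun q hq => h q (by simp [hq]))

-- the fold reaches exactly the minimum-ranked candidate (m, c)
lemma foldB_min (rk : String → Option Nat) (m : Nat) (c : String) (ps : List String) :
    ∀ acc,
      (∀ p ∈ ps, ∀ r, rk p = some r → m ≤ r ∧ (r = m → p = c)) →
      (∀ ar an, acc = some (ar, an) → m ≤ ar ∧ (ar = m → an = c)) →
      ((∃ p ∈ ps, rk p = some m) ∨ acc = some (m, c)) →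
      ps.foldl (stepB rk) acc = some (m, c) := by
  induction ps with
  | nil =>
    intro acc _ _ hw
    rcases hw with ⟨p, hp, _⟩ | h
    · exact absurd hp (by simp)
    · simpa using h
  | cons p ps ih =>
    intro acc hall hacc hw
    have hallp := fun r hr => hall p (by simp) r hr
    have halltl : ∀ q ∈ ps, ∀ r, rk q = some r → m ≤ r ∧ (r = m → q = c) :=
      fun q hq r hr => hall q (by simp [hq]) r hr
    simp only [List.foldl_cons]
    rcases hrp : rk p with _ | r
    · -- p unranked: accumulator unchanged
      simp only [stepB, hrp]
      refine ih acc halltl hacc ?_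
      rcases hw with ⟨q, hq, hqr⟩ | h
      · rcases List.mem_cons.mp hq with rfl | hq'
        · exact absurd hqr (by simp [hrp])
        · exact Or.inl ⟨q, hq', hqr⟩
      · exact Or.inr h
    · have ⟨hmr, hrm⟩ := hallp r hrp
      rcases acc with _ | ⟨ar, an⟩
      · -- accumulator empty: becomes (r, p)
        simp only [stepB, hrp]
        by_cases hr : r = m
        · subst hr
          have hpc : p = c := hrm rfl
          subst hpc
          refine ih (some (r, p)) halltl ?_ (Or.inr rfl)
          intro ar an h
          simp only [Option.some.injEq, Prod.mk.injEq] at h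
          exact ⟨h.1 ▸ le_refl r, fun _ => h.2.symm⟩
        · refine ih (some (r, p)) halltl ?_ ?_
          · intro ar an h
            simp only [Option.some.injEq, Prod.mk.injEq] at h
            refine ⟨h.1 ▸ hmr, fun he => absurd (h.1 ▸ he) hr⟩
          · rcases hw with ⟨q, hq, hqr⟩ | h
            · rcases List.mem_cons.mp hq with rfl | hq'
              · exact absurd (by rw [hrp] at hqr; simpa using hqr) hr
              · exact Or.inl ⟨q, hq', hqr⟩
            · exact absurd h (by simp)
      · have ⟨har, harm⟩ := hacc ar an rfl
        simp only [stepB, hrp]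
        by_cases hlt : r < ar
        · simp only [if_pos hlt]
          by_cases hr : r = m
          · subst hr
            have : p = c := hrm rfl
            subst this
            exact ih (some (r, p)) halltl
              (by intro a b h; simp only [Option.some.injEq, Prod.mk.injEq] at h;
                  exact ⟨h.1 ▸ le_refl r, fun _ => h.2.symm⟩) (Or.inr rfl)
          · refine ih (some (r, p)) halltl ?_ ?_
            · intro a b h
              simp only [Option.some.injEq, Prod.mk.injEq] at h
              exact ⟨h.1 ▸ hmr, fun he => absurd (h.1 ▸ he) hr⟩
            · rcases hw with ⟨q, hq, hqr⟩ | h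
              · rcases List.mem_cons.mp hq with rfl | hq'
                · exact absurd (by rw [hrp] at hqr; simpa using hqr) hr
                · exact Or.inl ⟨q, hq', hqr⟩
              · -- acc = some (m, c) but r < ar = m contradicts m ≤ r
                simp only [Option.some.injEq, Prod.mk.injEq] at h
                omega
        · simp only [if_neg hlt]
          refine ih (some (ar, an)) halltl hacc ?_
          rcases hw with ⟨q, hq, hqr⟩ | h
          · rcases List.mem_cons.mp hq with rfl | hq'
            · -- q = p with rank m: since ¬ r < ar and m ≤ r, m ≤ ar; rank p = some m means r = m, so ar = m
              rw [hrp] at hqr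
              have : r = m := by simpa using hqr
              have harm' : ar = m := by omega
              exact Or.inr (by rw [harm', harm harm'])
            · exact Or.inl ⟨q, hq', hqr⟩
          · exact Or.inr h

-- the appended "_data" makes the string longer, so it differs from the original
lemma append_data_ne (s : String) : ¬ (s ++ "_data" = s) := by
  intro h
  have := congrArg String.length h
  simp [String.length_append] at this

-- ===== VERDICT (by name: the statement is the Claim_ definition above) =====
theorem map_ceci_to_param_py_spec : Claim_equal_map_ceci_to_param_py := by
  intro inp ps _hDom
  unfold Spec_map_ceci_to_param_py map_ceci_to_param_py map_ceci_to_param_py_alt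
  have hacc0 : ∀ (m : Nat) (c : String), ∀ ar an, (none : Option (Nat × String)) = some (ar, an) → m ≤ ar ∧ (ar = m → an = c) := by
    intro m c ar an h; simp at h
  by_cases h1 : inp ∈ ps
  · have hall : ∀ p ∈ ps, ∀ r,
        rankB inp (inp ++ "_data")
          (if PySem.Str.endswith inp "_input" = true then some (PySem.Str.replace inp "_input" "_data") else none)
          p = some r → 0 ≤ r ∧ (r = 0 → p = inp) := by
      intro p _ r hr
      rcases rankB_inv _ _ _ _ _ hr with ⟨rfl, rfl⟩ | ⟨rfl, rfl⟩ | ⟨rfl, _, rfl⟩ | ⟨rfl, _, rfl⟩ |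
        ⟨rfl, _, rfl⟩ | ⟨rfl, _, rfl⟩ | ⟨rfl, -⟩ <;>
        exact ⟨by omega, fun h => by first | rfl | exact absurd h (by decide)⟩
    have hfold := foldB_min _ 0 inp ps none hall (hacc0 0 inp)
      (Or.inl ⟨inp, h1, by simp [rankB]⟩)
    simp [PySem.Str.endswith] at hfold
    simp [h1, hfold]
  · by_cases h2 : (inp ++ "_data") ∈ ps
    · have hall : ∀ p ∈ ps, ∀ r,
          rankB inp (inp ++ "_data")
            (if PySem.Str.endswith inp "_input" = true then some (PySem.Str.replace inp "_input" "_data") else none)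
            p = some r → 1 ≤ r ∧ (r = 1 → p = inp ++ "_data") := by
        intro p hp r hr
        rcases rankB_inv _ _ _ _ _ hr with ⟨rfl, rfl⟩ | ⟨rfl, rfl⟩ | ⟨rfl, _, rfl⟩ | ⟨rfl, _, rfl⟩ |
          ⟨rfl, _, rfl⟩ | ⟨rfl, _, rfl⟩ | ⟨rfl, -⟩
        · exact absurd hp h1
        all_goals exact ⟨by omega, fun h => by first | rfl | exact absurd h (by decide)⟩
      have hfold := foldB_min _ 1 (inp ++ "_data") ps none hall (hacc0 1 _)
        (Or.inl ⟨inp ++ "_data", h2, by simp [rankB, append_data_ne inp]⟩)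
      simp [PySem.Str.endswith] at hfold
      simp [h1, h2, hfold]
    · by_cases hI : inp = "input"
      · subst hI
        have h2' : "input_data" ∉ ps := by simpa using h2
        have hrn : (if PySem.Str.endswith "input" "_input" = true then
            some (PySem.Str.replace "input" "_input" "_data") else none) = (none : Option String) := by
          decide
        by_cases h3 : "data" ∈ ps
        · have hall : ∀ p ∈ ps, ∀ r,
              rankB "input" ("input" ++ "_data")
                (if PySem.Str.endswith "input" "_input" = true then some (PySem.Str.replace "input" "_input" "_data") else none)
                p = some r → 2 ≤ r ∧ (r = 2 → p = "data") := by
            intro p hp r hr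
            rcases rankB_inv _ _ _ _ _ hr with ⟨rfl, rfl⟩ | ⟨rfl, rfl⟩ | ⟨rfl, _, rfl⟩ | ⟨rfl, _, rfl⟩ |
              ⟨rfl, _, rfl⟩ | ⟨rfl, _, rfl⟩ | ⟨rfl, hrepl⟩
            · exact absurd hp h1
            · exact absurd hp h2
            · exact ⟨by omega, fun _ => rfl⟩
            · exact ⟨by omega, fun h => absurd h (by decide)⟩
            · exact ⟨by omega, fun h => absurd h (by decide)⟩
            · exact ⟨by omega, fun h => absurd h (by decide)⟩
            · rw [hrn] at hrepl; simp at hrepl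
          have hfold := foldB_min _ 2 "data" ps none hall (hacc0 2 _)
            (Or.inl ⟨"data", h3, by decide⟩)
          simp [PySem.Str.endswith] at hfold
          simp [h1, h2', pyFirstIn, h3, hfold]
        · by_cases h4 : "training_data" ∈ ps
          · have hall : ∀ p ∈ ps, ∀ r,
                rankB "input" ("input" ++ "_data")
                  (if PySem.Str.endswith "input" "_input" = true then some (PySem.Str.replace "input" "_input" "_data") else none)
                  p = some r → 3 ≤ r ∧ (r = 3 → p = "training_data") := by
              intro p hp r hr
              rcases rankB_inv _ _ _ _ _ hr with ⟨rfl, rfl⟩ | ⟨rfl, rfl⟩ | ⟨rfl, _, rfl⟩ | ⟨rfl, _, rfl⟩ |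
                ⟨rfl, _, rfl⟩ | ⟨rfl, _, rfl⟩ | ⟨rfl, hrepl⟩
              · exact absurd hp h1
              · exact absurd hp h2
              · exact absurd hp h3
              · exact ⟨by omega, fun _ => rfl⟩
              · exact ⟨by omega, fun h => absurd h (by decide)⟩
              · exact ⟨by omega, fun h => absurd h (by decide)⟩
              · rw [hrn] at hrepl; simp at hrepl
            have hfold := foldB_min _ 3 "training_data" ps none hall (hacc0 3 _)
              (Or.inl ⟨"training_data", h4, by decide⟩)
            simp [PySem.Str.endswith] at hfold
            simp [h1, h2', pyFirstIn, h3, h4, hfold]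
          · by_cases h5 : "catalog" ∈ ps
            · have hall : ∀ p ∈ ps, ∀ r,
                  rankB "input" ("input" ++ "_data")
                    (if PySem.Str.endswith "input" "_input" = true then some (PySem.Str.replace "input" "_input" "_data") else none)
                    p = some r → 4 ≤ r ∧ (r = 4 → p = "catalog") := by
                intro p hp r hr
                rcases rankB_inv _ _ _ _ _ hr with ⟨rfl, rfl⟩ | ⟨rfl, rfl⟩ | ⟨rfl, _, rfl⟩ | ⟨rfl, _, rfl⟩ |
                  ⟨rfl, _, rfl⟩ | ⟨rfl, _, rfl⟩ | ⟨rfl, hrepl⟩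
                · exact absurd hp h1
                · exact absurd hp h2
                · exact absurd hp h3
                · exact absurd hp h4
                · exact ⟨by omega, fun _ => rfl⟩
                · exact ⟨by omega, fun h => absurd h (by decide)⟩
                · rw [hrn] at hrepl; simp at hrepl
              have hfold := foldB_min _ 4 "catalog" ps none hall (hacc0 4 _)
                (Or.inl ⟨"catalog", h5, by decide⟩)
              simp [PySem.Str.endswith] at hfold
              simp [h1, h2', pyFirstIn, h3, h4, h5, hfold]
            · by_cases h6 : "sample" ∈ ps
              · have hall : ∀ p ∈ ps, ∀ r,
                    rankB "input" ("input" ++ "_data")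
                      (if PySem.Str.endswith "input" "_input" = true then some (PySem.Str.replace "input" "_input" "_data") else none)
                      p = some r → 5 ≤ r ∧ (r = 5 → p = "sample") := by
                  intro p hp r hr
                  rcases rankB_inv _ _ _ _ _ hr with ⟨rfl, rfl⟩ | ⟨rfl, rfl⟩ | ⟨rfl, _, rfl⟩ | ⟨rfl, _, rfl⟩ |
                    ⟨rfl, _, rfl⟩ | ⟨rfl, _, rfl⟩ | ⟨rfl, hrepl⟩
                  · exact absurd hp h1
                  · exact absurd hp h2
                  · exact absurd hp h3
                  · exact absurd hp h4
                  · exact absurd hp h5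
                  · exact ⟨by omega, fun _ => rfl⟩
                  · rw [hrn] at hrepl; simp at hrepl
                have hfold := foldB_min _ 5 "sample" ps none hall (hacc0 5 _)
                  (Or.inl ⟨"sample", h6, by decide⟩)
                simp [PySem.Str.endswith] at hfold
                simp [h1, h2', pyFirstIn, h3, h4, h5, h6, hfold]
              · -- no candidate matches: every parameter is unranked
                have hnone : ∀ p ∈ ps,
                    rankB "input" ("input" ++ "_data")
                      (if PySem.Str.endswith "input" "_input" = true then some (PySem.Str.replace "input" "_input" "_data") else none)
                      p = none := by
                  intro p hp
                  cases hpr : rankB "input" ("input" ++ "_data") _ p with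
                  | none => rfl
                  | some r =>
                    exfalso
                    rcases rankB_inv _ _ _ _ _ hpr with ⟨_, rfl⟩ | ⟨_, rfl⟩ | ⟨_, _, rfl⟩ | ⟨_, _, rfl⟩ |
                      ⟨_, _, rfl⟩ | ⟨_, _, rfl⟩ | ⟨_, hrepl⟩
                    · exact h1 hp
                    · exact h2 hp
                    · exact h3 hp
                    · exact h4 hp
                    · exact h5 hp
                    · exact h6 hp
                    · rw [hrn] at hrepl; simp at hrepl
                have hfold := foldB_none _ ps none hnone
                have hEnds : PySem.Chars.endswith ['i', 'n', 'p', 'u', 't'] ['_', 'i', 'n', 'p', 'u', 't'] = false := by decide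
                simp [PySem.Str.endswith, hEnds] at hfold
                simp [h1, h2', pyFirstIn, h3, h4, h5, h6, hfold, hEnds]
      · by_cases hE : PySem.Str.endswith inp "_input" = true
        · have hE' : PySem.Chars.endswith inp.toList ['_', 'i', 'n', 'p', 'u', 't'] = true := by
            simpa [PySem.Str.endswith] using hE
          have hrn : (if PySem.Str.endswith inp "_input" = true then
              some (PySem.Str.replace inp "_input" "_data") else none)
              = some (PySem.Str.replace inp "_input" "_data") := if_pos hE
          by_cases hR : PySem.Str.replace inp "_input" "_data" ∈ ps
          · have hne0 : ¬ PySem.Str.replace inp "_input" "_data" = inp :=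
              fun h => h1 (h ▸ hR)
            have hne1 : ¬ PySem.Str.replace inp "_input" "_data" = inp ++ "_data" :=
              fun h => h2 (h ▸ hR)
            have hall : ∀ p ∈ ps, ∀ r,
                rankB inp (inp ++ "_data")
                  (if PySem.Str.endswith inp "_input" = true then some (PySem.Str.replace inp "_input" "_data") else none)
                  p = some r →
                6 ≤ r ∧ (r = 6 → p = PySem.Str.replace inp "_input" "_data") := by
              intro p hp r hr
              rcases rankB_inv _ _ _ _ _ hr with ⟨rfl, rfl⟩ | ⟨rfl, rfl⟩ | ⟨rfl, hI', rfl⟩ | ⟨rfl, hI', rfl⟩ |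
                ⟨rfl, hI', rfl⟩ | ⟨rfl, hI', rfl⟩ | ⟨rfl, hrepl⟩
              · exact absurd hp h1
              · exact absurd hp h2
              · exact absurd hI' hI
              · exact absurd hI' hI
              · exact absurd hI' hI
              · exact absurd hI' hI
              · rw [hrn] at hrepl
                exact ⟨le_refl 6, fun _ => (Option.some.inj hrepl).symm⟩
            have hrw : rankB inp (inp ++ "_data")
                (if PySem.Str.endswith inp "_input" = true then some (PySem.Str.replace inp "_input" "_data") else none)
                (PySem.Str.replace inp "_input" "_data") = some 6 := by
              simp [rankB, hne0, hne1, hI, hE']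
            have hfold := foldB_min _ 6 (PySem.Str.replace inp "_input" "_data") ps none hall
              (hacc0 6 _) (Or.inl ⟨_, hR, hrw⟩)
            simp [PySem.Str.endswith, hE'] at hfold
            simp [h1, h2, hI, hE', hR, hfold]
          · have hnone : ∀ p ∈ ps,
                rankB inp (inp ++ "_data")
                  (if PySem.Str.endswith inp "_input" = true then some (PySem.Str.replace inp "_input" "_data") else none)
                  p = none := by
              intro p hp
              cases hpr : rankB inp (inp ++ "_data") _ p with
              | none => rfl
              | some r =>
                exfalso
                rcases rankB_inv _ _ _ _ _ hpr with ⟨_, rfl⟩ | ⟨_, rfl⟩ | ⟨_, hI', _⟩ | ⟨_, hI', _⟩ |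
                  ⟨_, hI', _⟩ | ⟨_, hI', _⟩ | ⟨_, hrepl⟩
                · exact h1 hp
                · exact h2 hp
                · exact hI hI'
                · exact hI hI'
                · exact hI hI'
                · exact hI hI'
                · rw [hrn] at hrepl
                  exact hR ((Option.some.inj hrepl) ▸ hp)
            have hfold := foldB_none _ ps none hnone
            simp [PySem.Str.endswith, hE'] at hfold
            simp [h1, h2, hI, hE', hR, hfold]
        · have hrn : (if PySem.Str.endswith inp "_input" = true then
              some (PySem.Str.replace inp "_input" "_data") else none) = (none : Option String) :=
            if_neg hE
          have hnone : ∀ p ∈ ps,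
              rankB inp (inp ++ "_data")
                (if PySem.Str.endswith inp "_input" = true then some (PySem.Str.replace inp "_input" "_data") else none)
                p = none := by
            intro p hp
            cases hpr : rankB inp (inp ++ "_data") _ p with
            | none => rfl
            | some r =>
              exfalso
              rcases rankB_inv _ _ _ _ _ hpr with ⟨_, rfl⟩ | ⟨_, rfl⟩ | ⟨_, hI', _⟩ | ⟨_, hI', _⟩ |
                ⟨_, hI', _⟩ | ⟨_, hI', _⟩ | ⟨_, hrepl⟩
              · exact h1 hp
              · exact h2 hp
              · exact hI hI'
              · exact hI hI'
              · exact hI hI'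
              · exact hI hI'
              · rw [hrn] at hrepl; simp at hrepl
          have hE' : PySem.Chars.endswith inp.toList ['_', 'i', 'n', 'p', 'u', 't'] = false := by
            simpa [PySem.Str.endswith] using (Bool.not_eq_true _).mp hE
          have hfold := foldB_none _ ps none hnone
          simp [PySem.Str.endswith, hE'] at hfold
          simp [h1, h2, hI, hE', hfold]
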